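-- pv_equiv track=rewrite | github.com/roudder/algorithms | heap/leetcode/longestsubstring/Solution.py | define_repeating_middle
-- ===== SOURCE A (Python) =====
-- def define_repeating_middle(index, s) -> dict:
--     primary_index = index
--     left_count = int()
--     right_count = int()
--     while index > 0 and s[index] == s[index - 1]:
--         left_count = left_count + 1
--         index = index - 1
--     index = primary_index
--     while index < len(s) - 1 and s[index] == s[index + 1]:
--         right_count = right_count + 1
--         index = index + 1
--     d = dict()
--     d["left"] = left_count
--     d["right"] = right_count
--     return d
-- ===== SOURCE B (Python) =====
-- def define_repeating_middle(index, s) -> dict: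
--     i = index + len(s) if index < 0 else index
--     left = 0
--     right = 0
--     start = 0
--     while start < len(s):
--         end = start
--         while end + 1 < len(s) and s[end + 1] == s[start]:
--             end = end + 1
--         if start <= i <= end:
--             left = i - start
--             right = end - i
--             break
--         start = end + 1
--     return {"left": left, "right": right}
-- ===== Notes on version B (the rewrite author's own statement) =====
-- stated objective: alternative
-- what changed: B replaces A's two outward character-by-character walks from the index by a single left-to-right scan over the string's equal-character runs, reading both counts off the run that contains the (Python-normalized) index.
-- intended difference: On negative in-range indices whose character repeats its left neighbour, or heads a run reaching the string's end with s[0] equal to it, A returns left=0 and a right count that walks across the end of the string via Python negative indexing (comparing s[-1] with s[0]); B interprets the index as index+len(s), as Python indexing itself does, and returns that character's run-based counts, which is the intended meaning. — e.g. on define_repeating_middle(-1, "aa"): A returns [("left", 0), ("right", 2)], B returns [("left", 1), ("right", 0)]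
import Mathlib
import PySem

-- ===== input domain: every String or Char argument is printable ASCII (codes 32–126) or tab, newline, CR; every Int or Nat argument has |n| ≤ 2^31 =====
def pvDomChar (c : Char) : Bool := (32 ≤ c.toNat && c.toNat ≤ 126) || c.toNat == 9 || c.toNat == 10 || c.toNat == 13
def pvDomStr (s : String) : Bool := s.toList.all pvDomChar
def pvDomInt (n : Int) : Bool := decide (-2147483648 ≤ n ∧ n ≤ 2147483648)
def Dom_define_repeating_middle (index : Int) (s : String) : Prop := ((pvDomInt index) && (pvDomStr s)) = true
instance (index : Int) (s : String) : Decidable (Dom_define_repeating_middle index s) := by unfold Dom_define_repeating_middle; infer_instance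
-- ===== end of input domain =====

-- B replaces A's two outward walks from `index` by one left-to-right scan over the string's
-- equal-character runs, reading both counts off the run containing the index (objective:
-- alternative decomposition, similar cost).

-- termination facts for the loops (cited by name in decreasing_by)
theorem pvDecDown {index : Int} (h : 0 < index) : (index - 1).toNat < index.toNat := by omega
theorem pvDecUp {L index : Int} (h : index < L - 1) : (L - (index + 1)).toNat < (L - index).toNat := by omega
theorem pvDecInner {L e : Nat} (h : e + 1 < L) : L - (e + 1) < L - e := by omega
theorem pvDecOuter {L st e : Nat} (h1 : st < L) (h2 : st ≤ e) : L - (e + 1) < L - st := by omega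

-- ===== PORT A =====
-- while index > 0 and s[index] == s[index - 1]: left_count += 1; index -= 1
def pvAleft (l : List Char) (index : Int) (cnt : Int) : Int :=
  if _h : 0 < index then
    match PySem.List.pyGet? l index, PySem.List.pyGet? l (index - 1) with
    | some a, some b => if a = b then pvAleft l (index - 1) (cnt + 1) else cnt
    | _, _ => cnt        -- Python raises IndexError here; Pre_ excludes these inputs
  else cnt
termination_by index.toNat
decreasing_by exact pvDecDown _h

-- while index < len(s) - 1 and s[index] == s[index + 1]: right_count += 1; index += 1
def pvAright (l : List Char) (index : Int) (cnt : Int) : Int :=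
  if _h : index < (l.length : Int) - 1 then
    match PySem.List.pyGet? l index, PySem.List.pyGet? l (index + 1) with
    | some a, some b => if a = b then pvAright l (index + 1) (cnt + 1) else cnt
    | _, _ => cnt        -- Python raises IndexError here; Pre_ excludes these inputs
  else cnt
termination_by ((l.length : Int) - index).toNat
decreasing_by exact pvDecUp _h

-- d = dict(); d["left"] = left_count; d["right"] = right_count; return d
def define_repeating_middle (index : Int) (s : String) : List (String × Int) :=
  (((PySem.Dict.empty : PySem.Dict String Int).insert
      "left" (pvAleft s.toList index 0)).insert
      "right" (pvAright s.toList index 0)).items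

-- ===== PORT B =====
-- inner loop: while end + 1 < len(s) and s[end + 1] == s[start]: end += 1   (c = s[start])
def pvBinner (l : List Char) (c : Char) (e : Nat) : Nat :=
  if h : e + 1 < l.length then
    (if l[e + 1] = c then pvBinner l c (e + 1) else e)
  else e
termination_by l.length - e
decreasing_by exact pvDecInner h

-- termination helper for the outer loop (start = end + 1 strictly advances)
theorem pvBinner_ge (l : List Char) (c : Char) (e : Nat) : e ≤ pvBinner l c e := by
  unfold pvBinner
  split
  · split
    · have := pvBinner_ge l c (e + 1)
      omega
    · omega
  · omega
termination_by l.length - e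

-- outer loop over run starts; break once the run containing i is found, else (0, 0)
def pvBouter (l : List Char) (i : Int) (start : Nat) : Int × Int :=
  if h : start < l.length then
    let e := pvBinner l l[start] start
    if (start : Int) ≤ i ∧ i ≤ (e : Int) then (i - start, (e : Int) - i)
    else pvBouter l i (e + 1)
  else (0, 0)
termination_by l.length - start
decreasing_by exact pvDecOuter h (pvBinner_ge l l[start] start)

-- i = index + len(s) if index < 0 else index; return {"left": left, "right": right}
def define_repeating_middle_alt (index : Int) (s : String) : List (String × Int) :=
  (PySem.Dict.ofList
    [("left", (pvBouter s.toList (if index < 0 then index + s.toList.length else index) 0).1),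
     ("right", (pvBouter s.toList (if index < 0 then index + s.toList.length else index) 0).2)]).items

-- ===== PRECONDITION & SPEC =====
-- Pre_ holds exactly where Python A returns (everywhere else A raises IndexError via s[index]):
-- index in [-len(s), len(s)), index = 0, or index = -1 on the empty string.
def Pre_define_repeating_middle (index : Int) (s : String) : Prop :=
  index = 0 ∨
  (-(s.toList.length : Int) ≤ index ∧ index < (s.toList.length : Int)) ∨
  (index = -1 ∧ s.toList.length = 0)
instance (index : Int) (s : String) : Decidable (Pre_define_repeating_middle index s) := by
  unfold Pre_define_repeating_middle; infer_instance

def pvWitness_define_repeating_middle : Int × String := (1, "aab")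

-- On a negative in-range index whose character repeats its left neighbour, or heads a run
-- reaching the end of a string whose first character equals it, A returns left = 0 and a right
-- count that walks across the string's end via Python negative indexing (comparing s[-1] with
-- s[0]); B interprets the index as index + len(s), as Python indexing itself does, and returns
-- that character's run-based counts, which is the intended meaning.
def D_define_repeating_middle (index : Int) (s : String) : Prop :=
  index < 0 ∧ -(s.toList.length : Int) ≤ index ∧ s.toList ≠ [] ∧
  (PySem.List.pyGet? s.toList (index - 1) = PySem.List.pyGet? s.toList index ∨
   List.IsChain (· = ·)
     (s.toList.drop (index + s.toList.length).toNat ++ s.toList.take 1))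
instance (index : Int) (s : String) : Decidable (D_define_repeating_middle index s) := by
  unfold D_define_repeating_middle; infer_instance

def Spec_define_repeating_middle (index : Int) (s : String) (out : List (String × Int)) : Prop :=
  ¬ D_define_repeating_middle index s → out = define_repeating_middle_alt index s
instance (index : Int) (s : String) (out : List (String × Int)) : Decidable (Spec_define_repeating_middle index s out) := by unfold Spec_define_repeating_middle; infer_instance

def pvDiffWitness_define_repeating_middle : Int × String := (-1, "aa")
def pvDiffWitnessOut_define_repeating_middle : (List (String × Int)) × (List (String × Int)) :=
  ([("left", 0), ("right", 2)], [("left", 1), ("right", 0)])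

-- ===== CLAIM (what is proved, stated in full; the proofs are below) =====
def Claim_unchanged_define_repeating_middle : Prop := ∀ (index : Int) (s : String), Dom_define_repeating_middle index s → Pre_define_repeating_middle index s → Spec_define_repeating_middle index s (define_repeating_middle index s)
def Claim_changed_define_repeating_middle : Prop := Dom_define_repeating_middle (pvDiffWitness_define_repeating_middle.1) (pvDiffWitness_define_repeating_middle.2) ∧ Pre_define_repeating_middle (pvDiffWitness_define_repeating_middle.1) (pvDiffWitness_define_repeating_middle.2) ∧ D_define_repeating_middle (pvDiffWitness_define_repeating_middle.1) (pvDiffWitness_define_repeating_middle.2) ∧ define_repeating_middle (pvDiffWitness_define_repeating_middle.1) (pvDiffWitness_define_repeating_middle.2) = pvDiffWitnessOut_define_repeating_middle.1 ∧ define_repeating_middle_alt (pvDiffWitness_define_repeating_middle.1) (pvDiffWitness_define_repeating_middle.2) = pvDiffWitnessOut_define_repeating_middle.2 ∧ pvDiffWitnessOut_define_repeating_middle.1 ≠ pvDiffWitnessOut_define_repeating_middle.2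
def Claim_exact_define_repeating_middle : Prop := ∀ (index : Int) (s : String), Dom_define_repeating_middle index s → Pre_define_repeating_middle index s → D_define_repeating_middle index s → define_repeating_middle index s ≠ define_repeating_middle_alt index s

-- ===== LEMMAS AND PROOFS =====

-- cntB l i = A's backward walk count from position i; cntF l i = A's forward walk count
def cntB (l : List Char) : Nat → Nat
  | 0 => 0
  | i + 1 => if l[i + 1]? = l[i]? then cntB l i + 1 else 0

theorem pvAleft_nonneg (l : List Char) (i : Nat) (cnt : Int) (hi : i < l.length) :
    pvAleft l (i : Int) cnt = cnt + cntB l i := by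
  induction i generalizing cnt with
  | zero => unfold pvAleft; simp [cntB]
  | succ m ih =>
    rw [pvAleft]
    have e1 : PySem.List.pyGet? l ((m + 1 : Nat) : Int) = l[m + 1]? :=
      PySem.List.pyGet?_natCast l (m + 1)
    have e2 : PySem.List.pyGet? l (((m + 1 : Nat) : Int) - 1) = l[m]? := by
      have : ((m + 1 : Nat) : Int) - 1 = (m : Int) := by push_cast; ring
      rw [this]; exact PySem.List.pyGet?_natCast l m
    rw [e1, e2]
    have hm1 : l[m + 1]? = some l[m + 1] := List.getElem?_eq_getElem hi
    have hm : l[m]? = some l[m] := List.getElem?_eq_getElem (by omega)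
    rw [hm1, hm]
    simp only [show (0 : Int) < ((m + 1 : Nat) : Int) from by omega]
    by_cases h : l[m + 1] = l[m]
    · simp only [h, if_true]
      have : ((m + 1 : Nat) : Int) - 1 = (m : Int) := by push_cast; ring
      rw [this, ih (cnt + 1) (by omega)]
      simp [cntB, hm1, hm, h]
      omega
    · simp only [if_neg h]
      simp [cntB, hm1, hm, h]

def cntF (l : List Char) (i : Nat) : Nat :=
  if _h : i + 1 < l.length ∧ l[i]? = l[i + 1]? then cntF l (i + 1) + 1 else 0
termination_by l.length - i
decreasing_by omega

theorem pvAright_nonneg_aux (l : List Char) (k : Nat) :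
    ∀ (i : Nat) (cnt : Int), l.length - i ≤ k → pvAright l (i : Int) cnt = cnt + cntF l i := by
  induction k with
  | zero =>
    intro i cnt hk
    have hc : ¬ ((i : Int) < (l.length : Int) - 1) := by omega
    rw [pvAright, dif_neg hc]
    rw [cntF, dif_neg (by omega)]
    simp
  | succ n ih =>
    intro i cnt hk
    by_cases hc : i + 1 < l.length
    · rw [pvAright, dif_pos (show (i : Int) < (l.length : Int) - 1 by omega)]
      rw [PySem.List.pyGet?_natCast]
      rw [show ((i : Int) + 1) = ((i + 1 : Nat) : Int) by push_cast; ring,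
          PySem.List.pyGet?_natCast]
      have h1 : l[i]? = some l[i] := List.getElem?_eq_getElem (by omega)
      have h2 : l[i + 1]? = some l[i + 1] := List.getElem?_eq_getElem hc
      rw [h1, h2]
      by_cases h : l[i] = l[i + 1]
      · simp only [h, if_true]
        rw [ih (i + 1) (cnt + 1) (by omega)]
        conv_rhs => rw [cntF]
        rw [dif_pos (⟨hc, by rw [h1, h2, h]⟩ : i + 1 < l.length ∧ l[i]? = l[i + 1]?)]
        push_cast; ring
      · simp only [if_neg h]
        rw [cntF, dif_neg (by rw [h1, h2]; simp [h, hc])]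
        simp
    · have hc' : ¬ ((i : Int) < (l.length : Int) - 1) := by omega
      rw [pvAright, dif_neg hc']
      rw [cntF, dif_neg (by omega)]
      simp

theorem pvAright_nonneg (l : List Char) (i : Nat) (cnt : Int) :
    pvAright l (i : Int) cnt = cnt + cntF l i :=
  pvAright_nonneg_aux l (l.length - i) i cnt le_rfl

def negW (l : List Char) (i : Nat) : Nat :=
  if _h : i + 1 < l.length then
    (if l[i]? = l[i + 1]? then negW l (i + 1) + 1 else 0)
  else
    (if l[l.length - 1]? = l[0]? then cntF l 0 + 1 else 0)
termination_by l.length - i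
decreasing_by omega

theorem pyGet?_neg_idx (l : List Char) (i : Nat) (hi : i < l.length) :
    PySem.List.pyGet? l ((i : Int) - (l.length : Int)) = l[i]? := by
  rw [show ((i : Int) - (l.length : Int)) = -(((l.length - i : Nat)) : Int) by omega,
      PySem.List.pyGet?_neg_natCast l (l.length - i) (by omega) (by omega),
      show l.length - (l.length - i) = i from by omega]

theorem pvAright_neg_aux (l : List Char) (k : Nat) :
    ∀ (i : Nat) (cnt : Int), i < l.length → l.length - i ≤ k →
      pvAright l ((i : Int) - (l.length : Int)) cnt = cnt + negW l i := by
  induction k with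
  | zero => intro i cnt hi hk; omega
  | succ n ih =>
    intro i cnt hi hk
    have hcond : (i : Int) - (l.length : Int) < (l.length : Int) - 1 := by omega
    rw [pvAright, dif_pos hcond, pyGet?_neg_idx l i hi]
    have h1 : l[i]? = some l[i] := List.getElem?_eq_getElem hi
    by_cases hc : i + 1 < l.length
    · -- next index is still negative: ↑i - ↑L + 1 = ↑(i+1) - ↑L
      have e2 : ((i : Int) - (l.length : Int) + 1) = ((i + 1 : Nat) : Int) - (l.length : Int) := by
        push_cast; ring
      rw [e2, pyGet?_neg_idx l (i + 1) hc]
      have h2 : l[i + 1]? = some l[i + 1] := List.getElem?_eq_getElem hc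
      rw [h1, h2]
      by_cases h : l[i] = l[i + 1]
      · simp only [h, if_true]
        rw [ih (i + 1) (cnt + 1) hc (by omega)]
        conv_rhs => rw [negW]
        rw [dif_pos hc, if_pos (by rw [h1, h2, h])]
        push_cast; ring
      · simp only [if_neg h]
        rw [negW, dif_pos hc, if_neg (by rw [h1, h2]; simpa using h)]
        simp
    · -- i = l.length - 1 : the walk is at index -1; compare s[-1] with s[0]
      have hi' : i = l.length - 1 := by omega
      have e2 : ((i : Int) - (l.length : Int) + 1) = ((0 : Nat) : Int) := by omega
      rw [e2, PySem.List.pyGet?_natCast]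
      have h0 : l[0]? = some l[0] := List.getElem?_eq_getElem (by omega)
      rw [h1, h0]
      by_cases h : l[i] = l[0]
      · simp only [h, if_true]
        have : pvAright l (((0 : Nat) : Int)) (cnt + 1) = (cnt + 1) + cntF l 0 :=
          pvAright_nonneg l 0 (cnt + 1)
        rw [show ((i : Int) - (l.length : Int) + 1) = ((0 : Nat) : Int) from e2] at *
        rw [this]
        conv_rhs => rw [negW]
        rw [dif_neg (by omega), if_pos (by rw [h0, ← hi', h1, h])]
        push_cast; ring
      · simp only [if_neg h]
        rw [negW, dif_neg (by omega), if_neg (by rw [h0, ← hi', h1]; simpa using h)]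
        simp

theorem pvAright_neg (l : List Char) (i : Nat) (cnt : Int) (hi : i < l.length) :
    pvAright l ((i : Int) - (l.length : Int)) cnt = cnt + negW l i :=
  pvAright_neg_aux l (l.length - i) i cnt hi le_rfl

theorem pvBinner_eq_aux (l : List Char) (k : Nat) :
    ∀ (c : Char) (p : Nat), l[p]? = some c → l.length - p ≤ k →
      pvBinner l c p = p + cntF l p := by
  induction k with
  | zero =>
    intro c p hp hk
    have hp' : p < l.length := by
      by_contra hn
      rw [List.getElem?_eq_none (by omega)] at hp
      simp at hp
    omega
  | succ n ih =>
    intro c p hp hk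
    rw [pvBinner]
    by_cases hc : p + 1 < l.length
    · rw [dif_pos hc]
      have h2 : l[p + 1]? = some l[p + 1] := List.getElem?_eq_getElem hc
      by_cases h : l[p + 1] = c
      · rw [if_pos h]
        rw [ih c (p + 1) (by rw [h2, h]) (by omega)]
        conv_rhs => rw [cntF]
        rw [dif_pos ⟨hc, by rw [hp, h2, h]⟩]
        omega
      · rw [if_neg h]
        conv_rhs => rw [cntF]
        rw [dif_neg (by rw [hp, h2]; intro hx; exact h (Option.some.inj hx.2).symm)]
        omega
    · rw [dif_neg hc]
      conv_rhs => rw [cntF]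
      rw [dif_neg (by omega)]
      omega


theorem pvBinner_eq (l : List Char) (c : Char) (p : Nat) (hp : l[p]? = some c) :
    pvBinner l c p = p + cntF l p :=
  pvBinner_eq_aux l (l.length - p) c p hp le_rfl

theorem cntF_pos (l : List Char) (p : Nat) (h : 0 < cntF l p) :
    p + 1 < l.length ∧ l[p]? = l[p + 1]? ∧ cntF l p = cntF l (p + 1) + 1 := by
  rw [cntF] at h ⊢
  by_cases hc : p + 1 < l.length ∧ l[p]? = l[p + 1]?
  · exact ⟨hc.1, hc.2, by rw [dif_pos hc]⟩
  · rw [dif_neg hc] at h; omega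

theorem cntF_add (l : List Char) (p k : Nat) (hk : k ≤ cntF l p) :
    cntF l (p + k) = cntF l p - k := by
  induction k generalizing p with
  | zero => simp
  | succ m ih =>
    obtain ⟨h1, h2, h3⟩ := cntF_pos l p (by omega)
    have := ih (p + 1) (by omega)
    rw [show p + (m + 1) = p + 1 + m from by omega, this]
    omega

theorem cntB_add (l : List Char) (p k : Nat)
    (hs : p = 0 ∨ l[p - 1]? ≠ l[p]?) (hk : k ≤ cntF l p) :
    cntB l (p + k) = k := by
  induction k with
  | zero =>
    rcases hs with h | h
    · subst h; rfl
    · rcases p with _ | m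
      · rfl
      · show cntB l (m + 1) = 0
        rw [cntB, if_neg (by simpa using fun hx => h hx.symm)]
  | succ m ih =>
    have hstep : l[p + m]? = l[p + m + 1]? := by
      have h0 : cntF l (p + m) = cntF l p - m := cntF_add l p m (by omega)
      obtain ⟨_, h2, _⟩ := cntF_pos l (p + m) (by omega)
      exact h2
    show cntB l (p + m + 1) = m + 1
    rw [cntB, if_pos (by rw [hstep]), ih (by omega)]

theorem pvBouter_eq_aux (l : List Char) (k : Nat) :
    ∀ (i p : Nat), (p = 0 ∨ l[p - 1]? ≠ l[p]?) → p ≤ i → i < l.length → l.length - p ≤ k →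
      pvBouter l (i : Int) p = ((cntB l i : Int), (cntF l i : Int)) := by
  induction k with
  | zero => intro i p hs hpi hi hk; omega
  | succ n ih =>
    intro i p hs hpi hi hk
    have hp : p < l.length := by omega
    rw [pvBouter, dif_pos hp]
    have hpg : l[p]? = some l[p] := List.getElem?_eq_getElem hp
    rw [pvBinner_eq l l[p] p hpg]
    by_cases hin : i ≤ p + cntF l p
    · rw [if_pos ⟨by omega, by push_cast; omega⟩]
      have hkle : i - p ≤ cntF l p := by omega
      have hB : cntB l i = i - p := by
        have := cntB_add l p (i - p) hs hkle
        rwa [show p + (i - p) = i from by omega] at this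
      have hF : cntF l i = cntF l p - (i - p) := by
        have := cntF_add l p (i - p) hkle
        rwa [show p + (i - p) = i from by omega] at this
      rw [hB, hF]
      rw [Prod.mk.injEq]
      refine ⟨by omega, by push_cast; omega⟩
    · rw [if_neg (by push_cast; omega)]
      have he1 : p + cntF l p + 1 ≤ i := by omega
      have hF0 : cntF l (p + cntF l p) = 0 := by
        have := cntF_add l p (cntF l p) le_rfl
        omega
      have hne : l[p + cntF l p]? ≠ l[p + cntF l p + 1]? := by
        intro hx
        rw [cntF, dif_pos ⟨by omega, hx⟩] at hF0
        omega
      exact ih i (p + cntF l p + 1)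
        (Or.inr (by simpa using hne)) (by omega) hi (by omega)

theorem pvBouter_eq (l : List Char) (i : Nat) (hi : i < l.length) :
    pvBouter l (i : Int) 0 = ((cntB l i : Int), (cntF l i : Int)) :=
  pvBouter_eq_aux l l.length i 0 (Or.inl rfl) (by omega) hi (by omega)

theorem negW_eq_cntF_aux (l : List Char) (k : Nat) :
    ∀ (i : Nat), i < l.length → l.length - i ≤ k →
      ¬ ((∀ c ∈ l.drop i, some c = l[i]?) ∧ l[0]? = l[i]?) →
      negW l i = cntF l i := by
  induction k with
  | zero => intro i hi hk _; omega
  | succ n ih =>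
    intro i hi hk h
    have hd : l.drop i = l[i] :: l.drop (i + 1) := List.drop_eq_getElem_cons hi
    have hg : l[i]? = some l[i] := List.getElem?_eq_getElem hi
    by_cases hc : i + 1 < l.length
    · have hg1 : l[i + 1]? = some l[i + 1] := List.getElem?_eq_getElem hc
      rw [negW, dif_pos hc]
      conv_rhs => rw [cntF]
      by_cases hEq : l[i]? = l[i + 1]?
      · rw [if_pos hEq, dif_pos ⟨hc, hEq⟩]
        have h' : ¬ ((∀ c ∈ l.drop (i + 1), some c = l[i + 1]?) ∧ l[0]? = l[i + 1]?) := by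
          rintro ⟨ha, h0⟩
          refine h ⟨?_, by rw [h0, hEq]⟩
          intro c hcmem
          rw [hd] at hcmem
          rcases List.mem_cons.mp hcmem with rfl | hm
          · exact hg.symm
          · rw [ha c hm, hEq]
        rw [ih (i + 1) hc (by omega) h']
      · rw [if_neg hEq, dif_neg (by intro hx; exact hEq hx.2)]
    · -- i = l.length - 1: the dropped tail is the singleton [l[i]], so h forces l[0]? ≠ l[i]?
      have hall : ∀ c ∈ l.drop i, some c = l[i]? := by
        intro c hcmem
        rw [hd, List.drop_eq_nil_of_le (by omega)] at hcmem
        rcases List.mem_singleton.mp hcmem with rfl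
        exact hg.symm
      have h0 : l[0]? ≠ l[i]? := fun hx => h ⟨hall, hx⟩
      rw [negW, dif_neg hc,
          if_neg (by rw [show l.length - 1 = i from by omega]; exact fun hx => h0 hx.symm)]
      rw [cntF, dif_neg (by omega)]

theorem negW_eq_cntF (l : List Char) (i : Nat) (hi : i < l.length)
    (h : ¬ ((∀ c ∈ l.drop i, some c = l[i]?) ∧ l[0]? = l[i]?)) :
    negW l i = cntF l i :=
  negW_eq_cntF_aux l (l.length - i) i hi le_rfl h

theorem negW_of_tail_aux (l : List Char) (k : Nat) :
    ∀ (i : Nat), i < l.length → l.length - i ≤ k →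
      (∀ c ∈ l.drop i, some c = l[i]?) → l[0]? = l[i]? →
      negW l i = cntF l i + cntF l 0 + 1 := by
  induction k with
  | zero => intro i hi hk _ _; omega
  | succ n ih =>
    intro i hi hk hall h0
    have hd : l.drop i = l[i] :: l.drop (i + 1) := List.drop_eq_getElem_cons hi
    have hg : l[i]? = some l[i] := List.getElem?_eq_getElem hi
    by_cases hc : i + 1 < l.length
    · have hg1 : l[i + 1]? = some l[i + 1] := List.getElem?_eq_getElem hc
      have hd1 : l.drop (i + 1) = l[i + 1] :: l.drop (i + 1 + 1) := List.drop_eq_getElem_cons hc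
      have hmem1 : l[i + 1] ∈ l.drop i := by
        rw [hd, hd1]; exact List.mem_cons_of_mem _ (List.mem_cons_self)
      have hEq : l[i]? = l[i + 1]? := by rw [hg1, ← hall l[i + 1] hmem1]
      have hall1 : ∀ c ∈ l.drop (i + 1), some c = l[i + 1]? := by
        intro c hcmem
        rw [← hEq]
        exact hall c (by rw [hd]; exact List.mem_cons_of_mem _ hcmem)
      rw [negW, dif_pos hc, if_pos hEq,
          ih (i + 1) hc (by omega) hall1 (by rw [h0, hEq])]
      conv_rhs => rw [cntF]
      rw [dif_pos ⟨hc, hEq⟩]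
      omega
    · rw [negW, dif_neg hc,
          if_pos (by rw [show l.length - 1 = i from by omega]; exact h0.symm)]
      conv_rhs => rw [cntF]
      rw [dif_neg (show ¬(i + 1 < l.length ∧ l[i]? = l[i + 1]?) from by omega)]
      omega

theorem negW_of_tail (l : List Char) (i : Nat) (hi : i < l.length)
    (hall : ∀ c ∈ l.drop i, some c = l[i]?) (h0 : l[0]? = l[i]?) :
    negW l i = cntF l i + cntF l 0 + 1 :=
  negW_of_tail_aux l (l.length - i) i hi le_rfl hall h0

-- the two association lists built by the ports, as plain list literals
theorem dictA_items (a b : Int) :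
    (((PySem.Dict.empty : PySem.Dict String Int).insert "left" a).insert "right" b).items
      = [("left", a), ("right", b)] := rfl

theorem dictB_items (a b : Int) :
    (PySem.Dict.ofList [("left", a), ("right", b)]).items = [("left", a), ("right", b)] := rfl

theorem cntB_zero_of_ne (l : List Char) (i : Nat)
    (h : ¬ (0 < i ∧ l[i - 1]? = l[i]?)) : cntB l i = 0 := by
  rcases i with _ | m
  · rfl
  · rw [cntB, if_neg (fun hx => h ⟨by omega, by simpa using hx.symm⟩)]

-- the two disjuncts of D_, re-read as conditions on the normalized position i
theorem chain_const (a : Char) (t : List Char) :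
    List.IsChain (· = ·) (a :: t) ↔ ∀ x ∈ t, x = a := by
  induction t generalizing a with
  | nil => simp
  | cons b t ih =>
    rw [List.isChain_cons_cons]
    constructor
    · rintro ⟨hab, hc⟩
      intro x hx
      rcases List.mem_cons.mp hx with rfl | hm
      · exact hab.symm
      · exact ((ih b).mp hc x hm).trans hab.symm
    · intro h
      have hb : b = a := h b List.mem_cons_self
      exact ⟨hb.symm, (ih b).mpr (fun x hx => (h x (List.mem_cons_of_mem _ hx)).trans hb.symm)⟩

theorem d1_iff (l : List Char) (index : Int) (i : Nat)
    (hik : index = (i : Int) - (l.length : Int)) (hi : i < l.length) :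
    (PySem.List.pyGet? l (index - 1) = PySem.List.pyGet? l index) ↔
      (0 < i ∧ l[i - 1]? = l[i]?) := by
  rw [hik, pyGet?_neg_idx l i hi]
  rcases Nat.eq_zero_or_pos i with rfl | hp
  · have hnone : PySem.List.pyGet? l (((0 : Nat) : Int) - (l.length : Int) - 1) = none := by
      rw [PySem.List.pyGet?_eq_none_iff, PySem.Raise.InRange]
      omega
    rw [hnone, List.getElem?_eq_getElem (show 0 < l.length by omega)]
    simp
  · have e : (i : Int) - (l.length : Int) - 1 = ((i - 1 : Nat) : Int) - (l.length : Int) := by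
      omega
    rw [e, pyGet?_neg_idx l (i - 1) (by omega)]
    simp [hp]

theorem d2_iff (l : List Char) (i : Nat) (hi : i < l.length) :
    List.IsChain (· = ·) (l.drop i ++ l.take 1) ↔
      ((∀ c ∈ l.drop i, some c = l[i]?) ∧ l[0]? = l[i]?) := by
  have hg : l[i]? = some l[i] := List.getElem?_eq_getElem hi
  have h0 : l[0]? = some l[0] := List.getElem?_eq_getElem (by omega)
  have ht : l.take 1 = [l[0]] := by
    cases l with
    | nil => simp at hi
    | cons a t => rfl
  have hd : l.drop i = l[i] :: l.drop (i + 1) := List.drop_eq_getElem_cons hi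
  rw [hd, ht, List.cons_append, chain_const]
  constructor
  · intro h
    refine ⟨?_, ?_⟩
    · intro c hc
      rw [hg]
      rcases List.mem_cons.mp hc with rfl | hm
      · rfl
      · exact congrArg some (h c (List.mem_append_left _ hm))
    · rw [h0, hg]
      exact congrArg some (h l[0] (List.mem_append_right _ (List.mem_singleton.mpr rfl)))
  · rintro ⟨ha, h00⟩
    intro x hx
    rcases List.mem_append.mp hx with hm | hm
    · have := ha x (List.mem_cons_of_mem _ hm)
      rw [hg] at this
      exact (Option.some.inj this).symm.symm
    · rcases List.mem_singleton.mp hm with rfl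
      rw [hg, h0] at h00
      exact Option.some.inj h00

-- B's value on every input of Pre_, written through cntB/cntF
theorem alt_eq (index : Int) (s : String) (i : Nat)
    (hik : (if index < 0 then index + s.toList.length else index) = (i : Int))
    (hi : i < s.toList.length) :
    define_repeating_middle_alt index s
      = [("left", (cntB s.toList i : Int)), ("right", (cntF s.toList i : Int))] := by
  rw [define_repeating_middle_alt, dictB_items, hik, pvBouter_eq s.toList i hi]

-- A's value on a nonnegative in-range index
theorem a_eq_nonneg (index : Int) (s : String) (i : Nat)
    (hik : index = (i : Int)) (hi : i < s.toList.length) :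
    define_repeating_middle index s
      = [("left", (cntB s.toList i : Int)), ("right", (cntF s.toList i : Int))] := by
  rw [define_repeating_middle, dictA_items, hik,
      pvAleft_nonneg s.toList i 0 hi, pvAright_nonneg s.toList i 0]
  simp

-- A's value on a negative in-range index: left = 0, right = the wrap-around walk negW
theorem a_eq_neg (index : Int) (s : String) (i : Nat)
    (hneg : index < 0) (hik : index = (i : Int) - (s.toList.length : Int))
    (hi : i < s.toList.length) :
    define_repeating_middle index s
      = [("left", 0), ("right", (negW s.toList i : Int))] := by
  rw [define_repeating_middle, dictA_items, hik,
      pvAright_neg s.toList i 0 hi]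
  rw [pvAleft, dif_neg (by omega)]
  simp

theorem both_zero_of_empty (index : Int) (s : String) (h : s.toList.length = 0)
    (hcase : index = 0 ∨ index = -1) :
    define_repeating_middle index s = [("left", 0), ("right", 0)] ∧
      define_repeating_middle_alt index s = [("left", 0), ("right", 0)] := by
  have hl : s.toList = [] := List.length_eq_zero_iff.mp h
  have hle : index ≤ 0 := by rcases hcase with h' | h' <;> omega
  have hge : -1 ≤ index := by rcases hcase with h' | h' <;> omega
  constructor
  · rw [define_repeating_middle, dictA_items, hl]
    rw [pvAleft, dif_neg (show ¬ 0 < index by omega)]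
    rw [pvAright, dif_neg (show ¬ index < ((([] : List Char)).length : Int) - 1 by simp; omega)]
  · rw [define_repeating_middle_alt, dictB_items, hl]
    rw [pvBouter, dif_neg (by simp)]

theorem main_unchanged (index : Int) (s : String)
    (hpre : Pre_define_repeating_middle index s)
    (hnd : ¬ D_define_repeating_middle index s) :
    define_repeating_middle index s = define_repeating_middle_alt index s := by
  by_cases hneg : index < 0
  · -- negative index: Pre_ forces -len ≤ index, and len = 0 only with index = -1
    rcases Nat.eq_zero_or_pos s.toList.length with h0 | hpos
    · have hm1 : index = -1 := by
        rcases hpre with h | h | h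
        · omega
        · omega
        · exact h.1
      obtain ⟨hA, hB⟩ := both_zero_of_empty index s h0 (Or.inr hm1)
      rw [hA, hB]
    · have hrange : -(s.toList.length : Int) ≤ index := by
        rcases hpre with h | h | h
        · omega
        · exact h.1
        · omega
      set i : Nat := (index + s.toList.length).toNat with hidef
      have hik : index = (i : Int) - (s.toList.length : Int) := by omega
      have hi : i < s.toList.length := by omega
      rw [a_eq_neg index s i hneg hik hi,
          alt_eq index s i (by rw [if_pos hneg]; omega) hi]
      rw [D_define_repeating_middle] at hnd
      push Not at hnd
      have hd2 := hnd hneg hrange (by intro h0; rw [h0] at hpos; simp at hpos)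
      have hnb : ¬ (0 < i ∧ s.toList[i - 1]? = s.toList[i]?) := by
        rw [← d1_iff s.toList index i hik hi]
        exact hd2.1
      have hall : ¬ ((∀ c ∈ s.toList.drop i, some c = s.toList[i]?) ∧
          s.toList[0]? = s.toList[i]?) := by
        rw [← d2_iff s.toList i hi]
        exact hd2.2
      rw [cntB_zero_of_ne s.toList i hnb, negW_eq_cntF s.toList i hi hall]
      simp
  · -- nonnegative index
    rcases Nat.eq_zero_or_pos s.toList.length with h0 | hpos
    · have hz : index = 0 := by
        rcases hpre with h | h | h
        · exact h
        · omega
        · omega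
      obtain ⟨hA, hB⟩ := both_zero_of_empty index s h0 (Or.inl hz)
      rw [hA, hB]
    · have hlt : index < (s.toList.length : Int) := by
        rcases hpre with h | h | h
        · omega
        · exact h.2
        · omega
      set i : Nat := index.toNat with hidef
      have hik : index = (i : Int) := by omega
      have hi : i < s.toList.length := by omega
      rw [a_eq_nonneg index s i hik hi, alt_eq index s i (by rw [if_neg hneg]; omega) hi]

-- ===== VERDICT (by name: the statement is the Claim_ definition above) =====
theorem define_repeating_middle_spec : Claim_unchanged_define_repeating_middle := by
  intro index s _hdom hpre hnd
  exact main_unchanged index s hpre hnd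

theorem define_repeating_middle_changed : Claim_changed_define_repeating_middle := by
  unfold Claim_changed_define_repeating_middle
  have htl : "aa".toList = ['a', 'a'] := by decide
  refine ⟨by decide, by decide, by decide, ?_, ?_, by decide⟩
  · show define_repeating_middle (-1) "aa" = [("left", 0), ("right", 2)]
    rw [define_repeating_middle, dictA_items, htl]
    simp [pvAleft, pvAright, PySem.List.pyGet?, PySem.List.pyIdx?]
  · show define_repeating_middle_alt (-1) "aa" = [("left", 1), ("right", 0)]
    rw [define_repeating_middle_alt, dictB_items, htl]
    simp [pvBouter, pvBinner]

theorem define_repeating_middle_tight : Claim_exact_define_repeating_middle := by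
  intro index s _hdom _hpre hd
  obtain ⟨hneg, hrange, hne, hdisj⟩ := hd
  have hpos : 0 < s.toList.length := List.length_pos_iff.mpr hne
  set i : Nat := (index + s.toList.length).toNat with hidef
  have hik : index = (i : Int) - (s.toList.length : Int) := by omega
  have hi : i < s.toList.length := by omega
  rw [a_eq_neg index s i hneg hik hi,
      alt_eq index s i (by rw [if_pos hneg]; omega) hi]
  intro heq
  simp only [List.cons.injEq, Prod.mk.injEq] at heq
  obtain ⟨⟨_, hleft⟩, ⟨_, hright⟩, _⟩ := heq
  rcases hdisj with h1 | h2
  case _ =>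
    obtain ⟨hipos, hrep⟩ := (d1_iff s.toList index i hik hi).mp h1
    -- the index's char repeats its left neighbour: B's left count is positive, A's is 0
    obtain ⟨m, hm⟩ : ∃ m, i = m + 1 := ⟨i - 1, by omega⟩
    rw [hm] at hrep
    have : cntB s.toList i ≥ 1 := by
      rw [hm, cntB, if_pos (by simpa using hrep.symm)]
      omega
    omega
  case _ =>
    -- wrap-around: A's right walk exceeds the run length by at least cntF l 0 + 1
    obtain ⟨hall, h0⟩ := (d2_iff s.toList i hi).mp h2
    rw [negW_of_tail s.toList i hi hall h0] at hright
    omega
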